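-- pv_equiv track=rewrite | github.com/netliomax25-code/sdk | tools/build_test_fast.py | guess_compiler_from_paths
-- ===== SOURCE A (Python) =====
-- def guess_compiler_from_paths(test_paths):
--     # Try to guess the best compiler based on the test paths
--     for path in test_paths:
--         # Wasm tests
--         if 'tests/web/wasm' in path or 'pkg/dart2wasm' in path:
--             return 'dart2wasm'
--         # DDC specific tests
--         elif 'tests/dartdevc' in path or 'pkg/dev_compiler' in path:
--             return 'ddc'
--         # General web / dart2js tests
--         elif 'tests/web' in path or 'pkg/compiler' in path:
--             return 'dart2js'
--         # Analyzer / language server tests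
--         elif 'pkg/analyzer' in path or 'pkg/analysis_server' in path:
--             return 'dart2analyzer'
--
--     # Default to the VM's JIT compiler
--     return 'dartk'
-- ===== SOURCE B (Python) =====
-- # Rule-major re-implementation: instead of scanning paths with an if/elif chain,
-- # compute for each rule the index of the FIRST path that matches it, then return
-- # the rule with the smallest such index (earlier rules win ties via strict '<').
-- RULES = [
--     (('tests/web/wasm', 'pkg/dart2wasm'), 'dart2wasm'),
--     (('tests/dartdevc', 'pkg/dev_compiler'), 'ddc'),
--     (('tests/web', 'pkg/compiler'), 'dart2js'),
--     (('pkg/analyzer', 'pkg/analysis_server'), 'dart2analyzer'),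
-- ]
--
-- def guess_compiler_from_paths(test_paths):
--     best_i, best_name = None, 'dartk'
--     for subs, name in RULES:
--         i = next((i for i, p in enumerate(test_paths)
--                   if any(s in p for s in subs)), None)
--         if i is not None and (best_i is None or i < best_i):
--             best_i, best_name = i, name
--     return best_name
-- ===== Notes on version B (the rewrite author's own statement) =====
-- stated objective: alternative
-- what changed: B inverts the traversal: instead of scanning paths and returning on the first path matched by the if/elif chain, it computes for each of the four rules the index of the first path that rule matches, then returns the rule with the smallest first-hit index (earlier rules win ties), defaulting to 'dartk'.
import Mathlib
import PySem

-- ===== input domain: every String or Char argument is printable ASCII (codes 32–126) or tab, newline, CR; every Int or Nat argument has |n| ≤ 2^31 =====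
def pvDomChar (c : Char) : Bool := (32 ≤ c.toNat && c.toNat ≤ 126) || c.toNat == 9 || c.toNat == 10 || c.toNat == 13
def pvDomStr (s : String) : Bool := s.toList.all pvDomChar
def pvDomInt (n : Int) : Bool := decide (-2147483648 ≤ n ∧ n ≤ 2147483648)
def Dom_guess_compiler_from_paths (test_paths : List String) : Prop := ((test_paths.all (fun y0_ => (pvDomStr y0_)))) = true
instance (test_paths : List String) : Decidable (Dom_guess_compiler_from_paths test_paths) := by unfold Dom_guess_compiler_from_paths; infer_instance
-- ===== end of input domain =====

-- B inverts the traversal: per rule it finds the first matching path index over the whole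
-- list, then selects the rule with the smallest such index (earlier rule wins ties);
-- objective: alternative (rule-major scan instead of path-major if/elif chain).


-- ===== PORT A =====
def guess_compiler_from_paths (test_paths : List String) : String :=
  match test_paths with
  | [] => "dartk"
  | path :: rest =>
    if PySem.Str.isIn "tests/web/wasm" path || PySem.Str.isIn "pkg/dart2wasm" path then
      "dart2wasm"
    else if PySem.Str.isIn "tests/dartdevc" path || PySem.Str.isIn "pkg/dev_compiler" path then
      "ddc"
    else if PySem.Str.isIn "tests/web" path || PySem.Str.isIn "pkg/compiler" path then
      "dart2js"
    else if PySem.Str.isIn "pkg/analyzer" path || PySem.Str.isIn "pkg/analysis_server" path then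
      "dart2analyzer"
    else
      guess_compiler_from_paths rest

-- ===== PORT B =====
def pvRules : List (List String × String) :=
  [ (["tests/web/wasm", "pkg/dart2wasm"], "dart2wasm"),
    (["tests/dartdevc", "pkg/dev_compiler"], "ddc"),
    (["tests/web", "pkg/compiler"], "dart2js"),
    (["pkg/analyzer", "pkg/analysis_server"], "dart2analyzer") ]

-- 'next((i for i, p in enumerate(test_paths) if any(s in p for s in subs)), None)'
def pvFirstHit (subs : List String) (test_paths : List String) : Option Nat :=
  test_paths.findIdx? (fun p => subs.any (fun s => PySem.Str.isIn s p))

-- the loop body: 'if i is not None and (best_i is None or i < best_i): best = (i, name)'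
def pvUpd (best : Option Nat × String) (i? : Option Nat) (name : String) : Option Nat × String :=
  match i? with
  | none => best
  | some i =>
    match best.1 with
    | none => (some i, name)
    | some bi => if i < bi then (some i, name) else best

def guess_compiler_from_paths_alt (test_paths : List String) : String :=
  (pvRules.foldl (fun best r => pvUpd best (pvFirstHit r.1 test_paths) r.2)
    (none, "dartk")).2

-- ===== PRECONDITION & SPEC =====
def Spec_guess_compiler_from_paths (test_paths : List String) (out : String) : Prop := out = guess_compiler_from_paths_alt test_paths
instance (test_paths : List String) (out : String) : Decidable (Spec_guess_compiler_from_paths test_paths out) := by unfold Spec_guess_compiler_from_paths; infer_instance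

-- ===== CLAIM (what is proved, stated in full; the proofs are below) =====
def Claim_equal_guess_compiler_from_paths : Prop := ∀ (test_paths : List String), Dom_guess_compiler_from_paths test_paths → Spec_guess_compiler_from_paths test_paths (guess_compiler_from_paths test_paths)

-- ===== LEMMAS AND PROOFS =====

-- head step of the per-rule first-hit index
theorem pvFirstHit_cons (subs : List String) (p : String) (rest : List String) :
    pvFirstHit subs (p :: rest) =
      if subs.any (fun s => PySem.Str.isIn s p) then some 0
      else (pvFirstHit subs rest).map (· + 1) := by
  simp [pvFirstHit, List.findIdx?_cons]

-- a first-time hit at index 0 is recorded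
theorem pvUpd_none_zero (m n : String) : pvUpd (none, m) (some 0) n = (some 0, n) := rfl

-- once the best index is 0, no later rule can replace it
theorem pvUpd_zero (m : String) (i? : Option Nat) (n : String) :
    pvUpd (some 0, m) i? n = (some 0, m) := by
  cases i? <;> simp [pvUpd]

-- a state whose index (if any) is positive is beaten by a rule hitting at index 0
theorem pvUpd_pos_zero (s : Option Nat × String) (h : ∀ k, s.1 = some k → 0 < k) (n : String) :
    pvUpd s (some 0) n = (some 0, n) := by
  obtain ⟨a, m⟩ := s
  cases a with
  | none => simp [pvUpd]
  | some k => simp [pvUpd, h k rfl]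

-- updating a positive-index state with a shifted hit keeps the index positive
theorem pvUpd_pos_shift (s : Option Nat × String) (h : ∀ k, s.1 = some k → 0 < k)
    (a : Option Nat) (n : String) :
    ∀ k, (pvUpd s (a.map (· + 1)) n).1 = some k → 0 < k := by
  obtain ⟨b, m⟩ := s
  intro k hk
  cases a with
  | none => exact h k hk
  | some i =>
    cases b with
    | none => simp [pvUpd] at hk; omega
    | some bi =>
      by_cases hib : i + 1 < bi
      · simp [pvUpd, hib] at hk; omega
      · have hb := h bi rfl
        simp [pvUpd, hib] at hk
        omega

-- shifting a hit index by one commutes with one update step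
theorem pvUpd_shift (s : Option Nat × String) (a : Option Nat) (n : String) :
    pvUpd (s.1.map (· + 1), s.2) (a.map (· + 1)) n
      = ((pvUpd s a n).1.map (· + 1), (pvUpd s a n).2) := by
  obtain ⟨b, m⟩ := s
  cases a with
  | none => simp [pvUpd]
  | some i =>
    cases b with
    | none => simp [pvUpd]
    | some bi =>
      by_cases hib : i < bi
      · simp [pvUpd, hib]
      · simp [pvUpd, hib, fun h => hib (by omega : i < bi)]

-- shifting every hit index by one does not change which rule the fold selects
theorem pvShift4 (a b c d : Option Nat) :
    (pvUpd (pvUpd (pvUpd (pvUpd ((none : Option Nat), "dartk") (a.map (· + 1)) "dart2wasm")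
        (b.map (· + 1)) "ddc") (c.map (· + 1)) "dart2js") (d.map (· + 1)) "dart2analyzer").2
  = (pvUpd (pvUpd (pvUpd (pvUpd ((none : Option Nat), "dartk") a "dart2wasm")
        b "ddc") c "dart2js") d "dart2analyzer").2 := by
  have h1 : pvUpd ((none : Option Nat), "dartk") (a.map (· + 1)) "dart2wasm"
      = ((pvUpd ((none : Option Nat), "dartk") a "dart2wasm").1.map (· + 1),
         (pvUpd ((none : Option Nat), "dartk") a "dart2wasm").2) :=
    pvUpd_shift ((none : Option Nat), "dartk") a "dart2wasm"
  rw [h1]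
  rw [pvUpd_shift (pvUpd ((none : Option Nat), "dartk") a "dart2wasm") b "ddc"]
  rw [pvUpd_shift (pvUpd (pvUpd ((none : Option Nat), "dartk") a "dart2wasm") b "ddc") c "dart2js"]
  rw [pvUpd_shift (pvUpd (pvUpd (pvUpd ((none : Option Nat), "dartk") a "dart2wasm") b "ddc") c "dart2js") d "dart2analyzer"]

-- B's fold written out over the four literal rules
theorem alt_unfold (tp : List String) :
    guess_compiler_from_paths_alt tp =
      (pvUpd (pvUpd (pvUpd (pvUpd (none, "dartk")
          (pvFirstHit ["tests/web/wasm", "pkg/dart2wasm"] tp) "dart2wasm")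
          (pvFirstHit ["tests/dartdevc", "pkg/dev_compiler"] tp) "ddc")
          (pvFirstHit ["tests/web", "pkg/compiler"] tp) "dart2js")
          (pvFirstHit ["pkg/analyzer", "pkg/analysis_server"] tp) "dart2analyzer").2 := by
  simp [guess_compiler_from_paths_alt, pvRules, List.foldl]

theorem pvEq (test_paths : List String) :
    guess_compiler_from_paths test_paths = guess_compiler_from_paths_alt test_paths := by
  induction test_paths with
  | nil => rfl
  | cons p rest ih =>
    rw [guess_compiler_from_paths, alt_unfold,
        pvFirstHit_cons, pvFirstHit_cons, pvFirstHit_cons, pvFirstHit_cons]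
    have e1 : (["tests/web/wasm", "pkg/dart2wasm"].any (fun s => PySem.Str.isIn s p))
        = (PySem.Str.isIn "tests/web/wasm" p || PySem.Str.isIn "pkg/dart2wasm" p) := by
      simp [List.any]
    have e2 : (["tests/dartdevc", "pkg/dev_compiler"].any (fun s => PySem.Str.isIn s p))
        = (PySem.Str.isIn "tests/dartdevc" p || PySem.Str.isIn "pkg/dev_compiler" p) := by
      simp [List.any]
    have e3 : (["tests/web", "pkg/compiler"].any (fun s => PySem.Str.isIn s p))
        = (PySem.Str.isIn "tests/web" p || PySem.Str.isIn "pkg/compiler" p) := by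
      simp [List.any]
    have e4 : (["pkg/analyzer", "pkg/analysis_server"].any (fun s => PySem.Str.isIn s p))
        = (PySem.Str.isIn "pkg/analyzer" p || PySem.Str.isIn "pkg/analysis_server" p) := by
      simp [List.any]
    rw [e1, e2, e3, e4]
    by_cases m1 : (PySem.Str.isIn "tests/web/wasm" p || PySem.Str.isIn "pkg/dart2wasm" p) = true
    · rw [if_pos m1, if_pos m1, pvUpd_none_zero, pvUpd_zero, pvUpd_zero, pvUpd_zero]
    · rw [if_neg m1, if_neg m1]
      by_cases m2 : (PySem.Str.isIn "tests/dartdevc" p || PySem.Str.isIn "pkg/dev_compiler" p) = true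
      · have h1 := pvUpd_pos_shift ((none : Option Nat), "dartk") (by simp)
          (pvFirstHit ["tests/web/wasm", "pkg/dart2wasm"] rest) "dart2wasm"
        rw [if_pos m2, if_pos m2, pvUpd_pos_zero _ h1, pvUpd_zero, pvUpd_zero]
      · rw [if_neg m2, if_neg m2]
        by_cases m3 : (PySem.Str.isIn "tests/web" p || PySem.Str.isIn "pkg/compiler" p) = true
        · have h1 := pvUpd_pos_shift ((none : Option Nat), "dartk") (by simp)
            (pvFirstHit ["tests/web/wasm", "pkg/dart2wasm"] rest) "dart2wasm"
          have h2 := pvUpd_pos_shift _ h1 (pvFirstHit ["tests/dartdevc", "pkg/dev_compiler"] rest) "ddc"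
          rw [if_pos m3, if_pos m3, pvUpd_pos_zero _ h2, pvUpd_zero]
        · rw [if_neg m3, if_neg m3]
          by_cases m4 : (PySem.Str.isIn "pkg/analyzer" p || PySem.Str.isIn "pkg/analysis_server" p) = true
          · have h1 := pvUpd_pos_shift ((none : Option Nat), "dartk") (by simp)
              (pvFirstHit ["tests/web/wasm", "pkg/dart2wasm"] rest) "dart2wasm"
            have h2 := pvUpd_pos_shift _ h1 (pvFirstHit ["tests/dartdevc", "pkg/dev_compiler"] rest) "ddc"
            have h3 := pvUpd_pos_shift _ h2 (pvFirstHit ["tests/web", "pkg/compiler"] rest) "dart2js"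
            rw [if_pos m4, if_pos m4, pvUpd_pos_zero _ h3]
          · rw [if_neg m4, if_neg m4, pvShift4, ih, alt_unfold]

-- ===== VERDICT (by name: the statement is the Claim_ definition above) =====
theorem guess_compiler_from_paths_spec : Claim_equal_guess_compiler_from_paths := by
  intro tp _
  unfold Spec_guess_compiler_from_paths
  exact pvEq tp
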